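-- pv_equiv track=rewrite | github.com/JAMBD/ruida_control | decode.py | split_msg
-- ===== SOURCE A (Python) =====
-- def split_msg(data):
--     msgs = []
--     current_msg = []
--     for i in data:
--         if i & 0x80 and current_msg:
--             msgs.append(current_msg)
--             current_msg = []
--         current_msg.append(i)
--     if current_msg:
--         msgs.append(current_msg)
--     return msgs
-- ===== SOURCE B (Python) =====
-- def split_msg(data):
--     msgs = []
--     j = 0
--     n = len(data)
--     while j < n:
--         k = j + 1
--         while k < n and not (data[k] & 0x80):
--             k += 1
--         msgs.append(data[j:k])
--         j = k
--     return msgs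
-- ===== Notes on version B (the rewrite author's own statement) =====
-- stated objective: alternative
-- what changed: A carries a per-element accumulator (current_msg) through one fold over bytes; B instead scans ahead to the next high-bit marker and slices each whole message span out of the data at once.
import Mathlib
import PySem

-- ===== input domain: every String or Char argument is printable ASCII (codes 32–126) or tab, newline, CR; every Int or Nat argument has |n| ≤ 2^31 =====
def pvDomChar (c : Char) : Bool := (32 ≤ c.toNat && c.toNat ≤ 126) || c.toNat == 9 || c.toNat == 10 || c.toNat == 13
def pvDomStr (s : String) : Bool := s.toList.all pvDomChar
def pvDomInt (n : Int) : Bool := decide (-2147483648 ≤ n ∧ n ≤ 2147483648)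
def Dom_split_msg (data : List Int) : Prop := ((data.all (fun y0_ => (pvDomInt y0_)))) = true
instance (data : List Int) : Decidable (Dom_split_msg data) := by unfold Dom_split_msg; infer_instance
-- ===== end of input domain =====

-- B replaces A's per-element accumulator loop by an iterative slicer: scan ahead to the
-- next high-bit marker and cut the whole message span out at once (objective: alternative).

-- ===== PORT A =====
def stepA (st : List (List Int) × List Int) (i : Int) : List (List Int) × List Int :=
  let st' := if PySem.Int.band i 128 ≠ 0 ∧ st.2 ≠ [] then (st.1 ++ [st.2], ([] : List Int)) else st
  (st'.1, st'.2 ++ [i])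

def split_msg (data : List Int) : List (List Int) :=
  let st := data.foldl stepA ([], [])
  if st.2 ≠ [] then st.1 ++ [st.2] else st.1

-- ===== PORT B =====
-- the inner 'while k < len(rest) and not (rest[k] & 0x80)' scan + the two slices rest[:k]/rest[k:]
-- are the takeWhile/dropWhile split of the tail at the first high-bit marker
def altGo (msgs : List (List Int)) (rest : List Int) : List (List Int) :=
  match rest with
  | [] => msgs
  | i :: r =>
      altGo (msgs ++ [i :: r.takeWhile (fun x => PySem.Int.band x 128 == 0)])
            (r.dropWhile (fun x => PySem.Int.band x 128 == 0))
termination_by rest.length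
decreasing_by
  have := List.length_dropWhile_le (fun x => PySem.Int.band x 128 == 0) r
  simp; omega

def split_msg_alt (data : List Int) : List (List Int) := altGo [] data

-- ===== PRECONDITION & SPEC =====
def Spec_split_msg (data : List Int) (out : List (List Int)) : Prop := out = split_msg_alt data
instance (data : List Int) (out : List (List Int)) : Decidable (Spec_split_msg data out) := by unfold Spec_split_msg; infer_instance

-- ===== CLAIM (what is proved, stated in full; the proofs are below) =====
def Claim_equal_split_msg : Prop := ∀ (data : List Int), Dom_split_msg data → Spec_split_msg data (split_msg data)

-- ===== LEMMAS AND PROOFS =====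

theorem altGo_append_aux (n : Nat) : ∀ (rest : List Int), rest.length ≤ n →
    ∀ acc, altGo acc rest = acc ++ altGo [] rest := by
  induction n with
  | zero =>
      intro rest h acc
      have : rest = [] := List.eq_nil_of_length_eq_zero (Nat.le_zero.mp h)
      subst this; simp [altGo]
  | succ n ih =>
      intro rest h acc
      cases rest with
      | nil => simp [altGo]
      | cons i r =>
          have hlen : (r.dropWhile (fun x => PySem.Int.band x 128 == 0)).length ≤ n := by
            have := List.length_dropWhile_le (fun x => PySem.Int.band x 128 == 0) r
            simp at h; omega
          rw [altGo, ih (r.dropWhile (fun x => PySem.Int.band x 128 == 0)) hlen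
                (acc ++ [i :: r.takeWhile (fun x => PySem.Int.band x 128 == 0)])]
          rw [altGo]
          simp only [List.nil_append]
          rw [ih (r.dropWhile (fun x => PySem.Int.band x 128 == 0)) hlen
                ([i :: r.takeWhile (fun x => PySem.Int.band x 128 == 0)])]
          simp

theorem altGo_append (rest : List Int) (acc : List (List Int)) :
    altGo acc rest = acc ++ altGo [] rest :=
  altGo_append_aux rest.length rest (le_refl _) acc

theorem stepA_pos (msgs : List (List Int)) (cur : List Int) (x : Int)
    (h : PySem.Int.band x 128 ≠ 0 ∧ cur ≠ []) : stepA (msgs, cur) x = (msgs ++ [cur], [x]) := by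
  unfold stepA; rw [if_pos h]; rfl

theorem stepA_neg (msgs : List (List Int)) (cur : List Int) (x : Int)
    (h : ¬ (PySem.Int.band x 128 ≠ 0 ∧ cur ≠ [])) : stepA (msgs, cur) x = (msgs, cur ++ [x]) := by
  unfold stepA; rw [if_neg h]

theorem foldl_stepA_fst (xs : List Int) : ∀ (msgs : List (List Int)) (cur : List Int),
    xs.foldl stepA (msgs, cur) =
      (msgs ++ (xs.foldl stepA ([], cur)).1, (xs.foldl stepA ([], cur)).2) := by
  induction xs with
  | nil => intro msgs cur; simp
  | cons x xs ih =>
      intro msgs cur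
      by_cases h : PySem.Int.band x 128 ≠ 0 ∧ cur ≠ []
      · rw [List.foldl_cons, List.foldl_cons, stepA_pos msgs cur x h, stepA_pos [] cur x h]
        simp only [List.nil_append]
        rw [ih (msgs ++ [cur]) [x], ih [cur] [x]]
        simp
      · rw [List.foldl_cons, List.foldl_cons, stepA_neg msgs cur x h, stepA_neg [] cur x h]
        rw [ih msgs (cur ++ [x])]

def finA (st : List (List Int) × List Int) : List (List Int) :=
  if st.2 ≠ [] then st.1 ++ [st.2] else st.1

theorem finA_prepend (msgs : List (List Int)) (st : List (List Int) × List Int) :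
    finA (msgs ++ st.1, st.2) = msgs ++ finA st := by
  unfold finA; split_ifs <;> simp

theorem main_lemma (xs : List Int) : ∀ (cur : List Int), cur ≠ [] →
    finA (xs.foldl stepA ([], cur)) =
      (cur ++ xs.takeWhile (fun x => PySem.Int.band x 128 == 0)) ::
        altGo [] (xs.dropWhile (fun x => PySem.Int.band x 128 == 0)) := by
  induction xs with
  | nil => intro cur hc; simp [finA, hc, altGo]
  | cons x xs ih =>
      intro cur hc
      by_cases hm : PySem.Int.band x 128 = 0
      · have hcond : ¬ (PySem.Int.band x 128 ≠ 0 ∧ cur ≠ []) := by simp [hm]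
        rw [List.foldl_cons, stepA_neg [] cur x hcond, ih (cur ++ [x]) (by simp)]
        simp [hm]
      · have hcond : (PySem.Int.band x 128 ≠ 0 ∧ cur ≠ []) := ⟨hm, hc⟩
        rw [List.foldl_cons, stepA_pos [] cur x hcond]
        simp only [List.nil_append]
        rw [foldl_stepA_fst xs [cur] [x]]
        rw [finA_prepend [cur] (xs.foldl stepA ([], [x]))]
        rw [ih [x] (by simp)]
        have : altGo [] (x :: xs) =
            (x :: xs.takeWhile (fun x => PySem.Int.band x 128 == 0)) ::
              altGo [] (xs.dropWhile (fun x => PySem.Int.band x 128 == 0)) := by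
          rw [altGo]
          simp only [List.nil_append]
          rw [altGo_append (List.dropWhile (fun x => PySem.Int.band x 128 == 0) xs)
                [x :: List.takeWhile (fun x => PySem.Int.band x 128 == 0) xs]]
          simp
        simp [hm, this]

-- ===== VERDICT (by name: the statement is the Claim_ definition above) =====
theorem split_msg_spec : Claim_equal_split_msg := by
  intro data _
  unfold Spec_split_msg split_msg split_msg_alt
  cases data with
  | nil => simp [altGo]
  | cons x xs =>
      have h0 : stepA ([], []) x = ([], [x]) := by simp [stepA]
      show finA ((x :: xs).foldl stepA ([], [])) = altGo [] (x :: xs)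
      rw [List.foldl_cons, h0, main_lemma xs [x] (by simp)]
      rw [altGo]
      simp only [List.nil_append]
      rw [altGo_append (List.dropWhile (fun x => PySem.Int.band x 128 == 0) xs)
            [x :: List.takeWhile (fun x => PySem.Int.band x 128 == 0) xs]]
      simp
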